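-- pv_equiv track=rewrite | github.com/francis-de-ladu/advent_of_code | 2015/05/solution.py | part2
-- ===== SOURCE A (Python) =====
-- def part2(data):
--     nice_string_cnt = 0
--     for string in data:
--         has_repeated_pair = False
--         for i in range(len(string)):
--             if string[i:i + 2] in string[i + 2:]:
--                 has_repeated_pair = True
--                 break
--         has_spaced_repeat = any(c1 == c2 for c1, c2 in zip(string, string[2:]))
--         if has_repeated_pair and has_spaced_repeat:
--             nice_string_cnt += 1
--
--     return nice_string_cnt
-- ===== SOURCE B (Python) =====
-- def part2(data):
--     cnt = 0
--     for s in data: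
--         first = {}
--         has_pair = False
--         for i in range(len(s) - 1):
--             p = s[i:i + 2]
--             if p in first:
--                 if i - first[p] >= 2:
--                     has_pair = True
--                     break
--             else:
--                 first[p] = i
--         has_spaced = False
--         for i in range(len(s) - 2):
--             if s[i] == s[i + 2]:
--                 has_spaced = True
--                 break
--         if has_pair and has_spaced:
--             cnt += 1
--     return cnt
-- ===== Notes on version B (the rewrite author's own statement) =====
-- stated objective: alternative
-- what changed: Replaced the per-string quadratic worst-case scan (for each position, a substring search for the 2-char pair in the rest of the string) by a single pass that records the first index of each 2-char pair in a dict and flags a repeat at distance >= 2; the spaced-repeat check becomes a plain index loop. Intended as faster (O(m) vs O(m^2) worst case per string); measured only 1.45x at the largest timing size, so not claimed as faster.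
import Mathlib
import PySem

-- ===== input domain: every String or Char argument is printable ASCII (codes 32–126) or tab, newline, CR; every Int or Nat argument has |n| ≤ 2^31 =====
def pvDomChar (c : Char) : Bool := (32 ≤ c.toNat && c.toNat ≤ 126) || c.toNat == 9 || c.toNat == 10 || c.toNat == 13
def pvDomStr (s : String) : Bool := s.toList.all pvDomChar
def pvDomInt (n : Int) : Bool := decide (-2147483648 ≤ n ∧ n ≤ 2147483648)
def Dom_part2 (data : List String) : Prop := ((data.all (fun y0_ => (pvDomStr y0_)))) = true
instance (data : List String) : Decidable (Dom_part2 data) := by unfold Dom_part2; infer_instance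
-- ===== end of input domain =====

-- B replaces A's quadratic per-string pair search (a substring search from every position) by a
-- single pass that keeps the first index of every 2-char pair in a dict; same return value.

-- ===== PORT A =====
-- 'for i in range(len(string)): if string[i:i+2] in string[i+2:]: … break' — early-exit loop
def aRepLoop (cs : List Char) : List Int → Bool
  | [] => false
  | i :: rest =>
    if PySem.Chars.isIn (PySem.List.slice cs (some i) (some (i + 2)))
        (PySem.List.slice cs (some (i + 2)) none) then true
    else aRepLoop cs rest

def part2 (data : List String) : Int :=
  data.foldl (fun cnt s =>
    let cs := s.toList
    let hasRepeatedPair := aRepLoop cs (PySem.List.pyRange 0 (cs.length : Int) 1)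
    let hasSpacedRepeat := (cs.zip (PySem.List.slice cs (some 2) none)).any (fun p => p.1 == p.2)
    if hasRepeatedPair && hasSpacedRepeat then cnt + 1 else cnt) 0

-- ===== PORT B =====
-- dict of first index of each 2-char pair; flag (and break) on a repeat at distance >= 2
def bPairLoop (cs : List Char) : List Int → PySem.Dict (List Char) Int → Bool
  | [], _ => false
  | i :: rest, first =>
    let p := PySem.List.slice cs (some i) (some (i + 2))
    match first.get? p with
    | some j => if 2 ≤ i - j then true else bPairLoop cs rest first
    | none => bPairLoop cs rest (first.insert p i)

-- 'for i in range(len(s) - 2): if s[i] == s[i+2]: … break'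
def bSpacedLoop (cs : List Char) : List Int → Bool
  | [] => false
  | i :: rest =>
    if PySem.List.pyGetD cs i ' ' == PySem.List.pyGetD cs (i + 2) ' ' then true
    else bSpacedLoop cs rest

def part2_alt (data : List String) : Int :=
  data.foldl (fun cnt s =>
    let cs := s.toList
    let hasPair := bPairLoop cs (PySem.List.pyRange 0 ((cs.length : Int) - 1) 1) PySem.Dict.empty
    let hasSpaced := bSpacedLoop cs (PySem.List.pyRange 0 ((cs.length : Int) - 2) 1)
    if hasPair && hasSpaced then cnt + 1 else cnt) 0

-- ===== PRECONDITION & SPEC =====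
def Spec_part2 (data : List String) (out : Int) : Prop := out = part2_alt data
instance (data : List String) (out : Int) : Decidable (Spec_part2 data out) := by unfold Spec_part2; infer_instance

-- ===== CLAIM (what is proved, stated in full; the proofs are below) =====
def Claim_equal_part2 : Prop := ∀ (data : List String), Dom_part2 data → Spec_part2 data (part2 data)

-- ===== LEMMAS AND PROOFS =====

-- the 2-character window starting at a
def pairAt (cs : List Char) (a : Nat) : List Char := (cs.drop a).take 2

-- the common characterisation of the "repeated pair" flag
def RepSpec (cs : List Char) : Prop :=
  ∃ a b : Nat, a + 2 ≤ b ∧ b + 1 < cs.length ∧ pairAt cs a = pairAt cs b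

-- a is the first index (< k) where pair p occurs
def leastOcc (cs : List Char) (p : List Char) (a k : Nat) : Prop :=
  a < k ∧ pairAt cs a = p ∧ ∀ a' < a, pairAt cs a' ≠ p

-- dict invariant: first maps each pair to its first occurrence among indices < k
def Inv1 (cs : List Char) (first : PySem.Dict (List Char) Int) (k : Nat) : Prop :=
  ∀ p j, first.get? p = some j ↔ ∃ a : Nat, j = (a : Int) ∧ leastOcc cs p a k

lemma slice_pair (cs : List Char) (a : Nat) :
    PySem.List.slice cs (some (a : Int)) (some ((a : Int) + 2)) = pairAt cs a := by
  have h : ((a : Int) + 2) = ((a + 2 : Nat) : Int) := by push_cast; ring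
  rw [h, PySem.List.slice_natCast]
  have h2 : a + 2 - a = 2 := by omega
  rw [h2, pairAt]

lemma length_pairAt (cs : List Char) (a : Nat) :
    (pairAt cs a).length = min 2 (cs.length - a) := by
  simp [pairAt]

lemma pairAt_prefix_drop_iff (cs : List Char) (a b : Nat) (ha : a + 2 ≤ b) (hb : a < cs.length) :
    pairAt cs a <+: cs.drop b ↔ b + 1 < cs.length ∧ pairAt cs a = pairAt cs b := by
  constructor
  · intro h
    have hlen := h.length_le
    rw [length_pairAt, List.length_drop] at hlen
    have hb1 : b + 1 < cs.length := by omega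
    have h2 : (pairAt cs a).length = 2 := by rw [length_pairAt]; omega
    have := List.prefix_iff_eq_take.mp h
    rw [h2] at this
    exact ⟨hb1, this⟩
  · rintro ⟨hb1, heq⟩
    rw [heq, pairAt]
    exact List.take_prefix _ _

lemma aRepLoop_eq_any (cs : List Char) (idxs : List Int) :
    aRepLoop cs idxs = idxs.any (fun i =>
      PySem.Chars.isIn (PySem.List.slice cs (some i) (some (i + 2)))
        (PySem.List.slice cs (some (i + 2)) none)) := by
  induction idxs with
  | nil => rfl
  | cons i rest ih =>
    rw [aRepLoop, List.any_cons]
    split_ifs with h <;> simp [h, ih]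

lemma aRep_iff (cs : List Char) :
    aRepLoop cs (PySem.List.pyRange 0 (cs.length : Int) 1) = true ↔ RepSpec cs := by
  rw [aRepLoop_eq_any, PySem.List.pyRange_one]
  simp only [List.any_map, List.any_eq_true, List.mem_range, Function.comp_apply, zero_add,
    Int.sub_zero, Int.toNat_natCast]
  constructor
  · rintro ⟨a, ha, hin⟩
    rw [slice_pair, PySem.List.slice_from _ (by positivity)] at hin
    have h2 : ((a : Int) + 2).toNat = a + 2 := by omega
    rw [h2] at hin
    obtain ⟨j, hj⟩ := (PySem.Chars.exists_prefix_drop_iff_isIn _ _).mpr hin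
    rw [List.drop_drop] at hj
    have := (pairAt_prefix_drop_iff cs a (a + 2 + j) (by omega) ha).mp hj
    exact ⟨a, a + 2 + j, by omega, this.1, this.2⟩
  · rintro ⟨a, b, hab, hb, heq⟩
    refine ⟨a, by omega, ?_⟩
    rw [slice_pair, PySem.List.slice_from _ (by positivity)]
    have h2 : ((a : Int) + 2).toNat = a + 2 := by omega
    rw [h2]
    apply (PySem.Chars.exists_prefix_drop_iff_isIn _ _).mp
    refine ⟨b - (a + 2), ?_⟩
    rw [List.drop_drop]
    have h3 : a + 2 + (b - (a + 2)) = b := by omega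
    rw [h3]
    exact (pairAt_prefix_drop_iff cs a b hab (by omega)).mpr ⟨hb, heq⟩

-- if some earlier occurrence exists, a least one exists
lemma exists_leastOcc (cs : List Char) (p : List Char) (k : Nat)
    (h : ∃ a, a < k ∧ pairAt cs a = p) : ∃ a, leastOcc cs p a k := by
  have h' : ∃ a, pairAt cs a = p := ⟨h.choose, h.choose_spec.2⟩
  refine ⟨Nat.find h', ?_, Nat.find_spec h', fun a' ha' => Nat.find_min h' ha'⟩
  have := Nat.find_min' h' h.choose_spec.2
  omega

-- the index list [k, k+1, …, k+t-1] as Ints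
def idxList (k t : Nat) : List Int :=
  match t with
  | 0 => []
  | t + 1 => (k : Int) :: idxList (k + 1) t

lemma idxList_eq_pyRange : ∀ (t k : Nat), idxList k t = PySem.List.pyRange (k : Int) ((k + t : Nat) : Int) 1 := by
  intro t
  induction t with
  | zero =>
    intro k
    rw [idxList, PySem.List.pyRange_one_eq_nil (by omega)]
  | succ t ih =>
    intro k
    rw [idxList, PySem.List.pyRange_one_cons (by omega), ih (k + 1)]
    have h1 : (k : Int) + 1 = ((k + 1 : Nat) : Int) := by push_cast; ring
    have h2 : ((k + (t + 1) : Nat) : Int) = (((k + 1) + t : Nat) : Int) := by push_cast; ring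
    rw [h1, h2]

lemma pyRange_eq_idxList (m : Int) : PySem.List.pyRange 0 m 1 = idxList 0 m.toNat := by
  by_cases h : 0 ≤ m
  · rw [idxList_eq_pyRange m.toNat 0]
    congr 1; omega
  · rw [PySem.List.pyRange_one_eq_nil (by omega)]
    have : m.toNat = 0 := by omega
    rw [this, idxList]

lemma bPair_inv (cs : List Char) :
    ∀ (t k : Nat) (first : PySem.Dict (List Char) Int), Inv1 cs first k →
      (bPairLoop cs (idxList k t) first = true ↔
        ∃ a b : Nat, a + 2 ≤ b ∧ k ≤ b ∧ b < k + t ∧ pairAt cs a = pairAt cs b) := by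
  intro t
  induction t with
  | zero =>
    intro k first _
    simp [idxList, bPairLoop]
    omega
  | succ t ih =>
    intro k first hinv
    rw [idxList, bPairLoop]
    simp only [slice_pair]
    cases hget : first.get? (pairAt cs k) with
    | some j =>
      dsimp only
      obtain ⟨a, rfl, hlo⟩ := (hinv _ _).mp hget
      by_cases hak : a + 2 ≤ k
      · have h2 : (2 : Int) ≤ (k : Int) - (a : Int) := by omega
        rw [if_pos h2]
        simp only [true_iff]
        exact ⟨a, k, hak, le_refl k, by omega, hlo.2.1⟩
      · have h2 : ¬ (2 : Int) ≤ (k : Int) - (a : Int) := by omega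
        rw [if_neg h2]
        have hinv' : Inv1 cs first (k + 1) := by
          intro p' j'
          rw [hinv p' j']
          constructor
          · rintro ⟨a', rfl, h1, h2, h3⟩
            exact ⟨a', rfl, by omega, h2, h3⟩
          · rintro ⟨a', rfl, hq1, hq2, hq3⟩
            refine ⟨a', rfl, ?_, hq2, hq3⟩
            rcases Nat.lt_succ_iff_lt_or_eq.mp hq1 with h | rfl
            · exact h
            · exact absurd (hlo.2.1.trans hq2) (hq3 a hlo.1)
        rw [ih (k + 1) first hinv']
        constructor
        · rintro ⟨a', b, h1, h2, h3, h4⟩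
          exact ⟨a', b, h1, by omega, by omega, h4⟩
        · rintro ⟨a', b, h1, h2, h3, h4⟩
          rcases Nat.lt_or_ge k b with h | h
          · exact ⟨a', b, h1, h, by omega, h4⟩
          · -- b = k : a' would be an occurrence below k, at distance ≥ 2, contradicting ¬(a+2 ≤ k)
            have hbk : b = k := by omega
            subst hbk
            have haa' : a ≤ a' := by
              by_contra hlt
              exact hlo.2.2 a' (by omega) h4
            omega
    | none =>
      dsimp only
      have hnone : ∀ a < k, pairAt cs a ≠ pairAt cs k := by
        intro a ha heq
        obtain ⟨a0, hlo⟩ := exists_leastOcc cs (pairAt cs k) k ⟨a, ha, heq⟩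
        have hsome := (hinv _ _).mpr ⟨a0, rfl, hlo⟩
        rw [hget] at hsome
        simp at hsome
      have hinv' : Inv1 cs (first.insert (pairAt cs k) (k : Int)) (k + 1) := by
        intro p' j'
        by_cases hp : p' = pairAt cs k
        · subst hp
          rw [PySem.Dict.get?_insert_self]
          constructor
          · rintro ⟨rfl⟩
            exact ⟨k, rfl, by omega, rfl, hnone⟩
          · rintro ⟨a', rfl, h1, h2, h3⟩
            have : a' = k := by
              rcases Nat.lt_succ_iff_lt_or_eq.mp h1 with h | h
              · exact absurd h2 (hnone a' h)
              · exact h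
            subst this; rfl
        · rw [PySem.Dict.get?_insert_of_ne _ _ hp, hinv p' j']
          constructor
          · rintro ⟨a', rfl, h1, h2, h3⟩
            exact ⟨a', rfl, by omega, h2, h3⟩
          · rintro ⟨a', rfl, h1, h2, h3⟩
            refine ⟨a', rfl, ?_, h2, h3⟩
            rcases Nat.lt_succ_iff_lt_or_eq.mp h1 with h | rfl
            · exact h
            · exact absurd h2.symm hp
      rw [ih (k + 1) _ hinv']
      constructor
      · rintro ⟨a', b, h1, h2, h3, h4⟩
        exact ⟨a', b, h1, by omega, by omega, h4⟩
      · rintro ⟨a', b, h1, h2, h3, h4⟩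
        rcases Nat.lt_or_ge k b with h | h
        · exact ⟨a', b, h1, h, by omega, h4⟩
        · have hbk : b = k := by omega
          subst hbk
          exact absurd h4 (hnone a' (by omega))
  
lemma bPair_iff (cs : List Char) :
    bPairLoop cs (PySem.List.pyRange 0 ((cs.length : Int) - 1) 1) PySem.Dict.empty = true ↔
      RepSpec cs := by
  have hempty : Inv1 cs PySem.Dict.empty 0 := by
    intro p j
    simp [PySem.Dict.get?_empty, leastOcc]
  rw [pyRange_eq_idxList, bPair_inv cs _ 0 _ hempty, RepSpec]
  constructor
  · rintro ⟨a, b, h1, _, h3, h4⟩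
    exact ⟨a, b, h1, by omega, h4⟩
  · rintro ⟨a, b, h1, h2, h4⟩
    exact ⟨a, b, h1, by omega, by omega, h4⟩

lemma bSpacedLoop_eq_any (cs : List Char) (idxs : List Int) :
    bSpacedLoop cs idxs = idxs.any (fun i =>
      PySem.List.pyGetD cs i ' ' == PySem.List.pyGetD cs (i + 2) ' ') := by
  induction idxs with
  | nil => rfl
  | cons i rest ih =>
    rw [bSpacedLoop, List.any_cons]
    split_ifs with h <;> simp [h, ih]

lemma spaced_eq (cs : List Char) :
    (cs.zip (PySem.List.slice cs (some 2) none)).any (fun p => p.1 == p.2) =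
      bSpacedLoop cs (PySem.List.pyRange 0 ((cs.length : Int) - 2) 1) := by
  rw [bSpacedLoop_eq_any, PySem.List.pyRange_one,
    PySem.List.slice_from _ (by norm_num : (0:Int) ≤ 2)]
  rw [Bool.eq_iff_iff]
  simp only [List.any_map, List.any_eq_true, Function.comp_apply, List.mem_range, zero_add,
    Int.sub_zero]
  constructor
  · rintro ⟨x, hx, hp⟩
    obtain ⟨i, hi, rfl⟩ := List.mem_iff_getElem.mp hx
    rw [List.length_zip, List.length_drop] at hi
    refine ⟨i, by omega, ?_⟩
    have h1 : ((i : Int) + 2) = ((i + 2 : Nat) : Int) := by push_cast; ring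
    rw [PySem.List.pyGetD_natCast, h1, PySem.List.pyGetD_natCast]
    rw [List.getElem_zip] at hp
    simp only at hp
    rw [List.getElem_drop] at hp
    rw [List.getD_eq_getElem cs ' ' (by omega), List.getD_eq_getElem cs ' ' (by omega)]
    have h2 : 2 + i = i + 2 := by omega
    simp_all
  · rintro ⟨i, hi, hp⟩
    have h1 : ((i : Int) + 2) = ((i + 2 : Nat) : Int) := by push_cast; ring
    rw [PySem.List.pyGetD_natCast, h1, PySem.List.pyGetD_natCast] at hp
    have hi2 : i + 2 < cs.length := by omega
    rw [List.getD_eq_getElem cs ' ' (by omega), List.getD_eq_getElem cs ' ' hi2] at hp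
    refine ⟨(cs.zip (cs.drop (2:Int).toNat))[i]'(by
      rw [List.length_zip, List.length_drop]; omega), List.getElem_mem _, ?_⟩
    rw [List.getElem_zip]
    simp only
    rw [List.getElem_drop]
    have h2 : (2:Int).toNat + i = i + 2 := by omega
    simp_all

-- ===== VERDICT (by name: the statement is the Claim_ definition above) =====
theorem part2_spec : Claim_equal_part2 := by
  intro data _
  unfold Spec_part2 part2 part2_alt
  refine PySem.List.foldl_congr_mem data _ _ 0 ?_
  intro cnt s _
  simp only
  have h1 : aRepLoop s.toList (PySem.List.pyRange 0 (s.toList.length : Int) 1) =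
      bPairLoop s.toList (PySem.List.pyRange 0 ((s.toList.length : Int) - 1) 1) PySem.Dict.empty := by
    rw [Bool.eq_iff_iff, aRep_iff, bPair_iff]
  rw [h1, spaced_eq]
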